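-- pv_equiv track=rewrite | github.com/minacochang/dify-enterprise-docbot | src/docbot/extract.py | extract_headings_and_body_prefix_markdown
-- ===== SOURCE A (Python) =====
-- def extract_headings_and_body_prefix_markdown(md: str, body_prefix_len: int = 4000) -> tuple[str, str]:
--     """Markdown から headings と body_prefix を抽出"""
--     lines = md.split("\n")
--     headings_parts = []
--     body_parts = []
--     total = 0
--
--     for line in lines:
--         s = line.strip()
--         if s.startswith("## ") or s.startswith("### "):
--             h = s.lstrip("# ").strip()
--             if h and len(headings_parts) < 60:
--                 headings_parts.append(h)
--         elif s and not s.startswith("#") and total < body_prefix_len: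
--             body_parts.append(s)
--             total += len(s) + 1
--
--     headings = " | ".join(headings_parts[:60])
--     body_prefix = " ".join(body_parts)[:body_prefix_len]
--     return headings, body_prefix
-- ===== SOURCE B (Python) =====
-- from itertools import accumulate, takewhile
--
--
-- def extract_headings_and_body_prefix_markdown(md: str, body_prefix_len: int = 4000) -> tuple[str, str]:
--     stripped = [line.strip() for line in md.split("\n")]
--
--     heads = [h for s in stripped
--              if (s.startswith("## ") or s.startswith("### "))
--              and (h := s.lstrip("# ").strip())]
--     headings = " | ".join(heads[:60])
--
--     kept = [s for s in stripped if s and not s.startswith("#")]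
--     cums = accumulate((len(s) + 1 for s in kept), initial=0)  # total before each kept line
--     taken = takewhile(lambda p: p[1] < body_prefix_len, zip(kept, cums))
--     body_prefix = " ".join(s for s, _ in taken)[:body_prefix_len]
--     return headings, body_prefix
-- ===== Notes on version B (the rewrite author's own statement) =====
-- stated objective: alternative
-- what changed: Replaces A's single stateful loop (shared mutable heading list and running body-length counter) with two independent declarative passes: a filter/map pipeline for headings and a prefix-sum (itertools.accumulate) + takewhile pipeline that reproduces the body-length cap without mutable state.
import Mathlib
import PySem

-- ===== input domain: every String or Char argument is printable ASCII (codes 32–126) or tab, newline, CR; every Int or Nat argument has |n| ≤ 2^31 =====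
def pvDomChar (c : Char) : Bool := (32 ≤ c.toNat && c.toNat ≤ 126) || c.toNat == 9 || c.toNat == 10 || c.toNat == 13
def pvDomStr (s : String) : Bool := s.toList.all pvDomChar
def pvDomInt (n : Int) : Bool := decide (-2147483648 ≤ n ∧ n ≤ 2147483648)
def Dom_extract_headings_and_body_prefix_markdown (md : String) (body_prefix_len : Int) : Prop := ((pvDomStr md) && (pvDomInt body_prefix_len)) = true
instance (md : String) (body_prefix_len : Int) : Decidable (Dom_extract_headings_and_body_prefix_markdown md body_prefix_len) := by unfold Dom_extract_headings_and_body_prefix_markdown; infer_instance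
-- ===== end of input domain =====

-- B rebuilds the headings and the body prefix in two independent filter/map passes
-- (prefix sums + takewhile for the body cap) instead of A's single stateful loop; objective: alternative decomposition.

-- exact hand port of Python's s.lstrip("# "): drop leading characters belonging to {'#', ' '}
def pyLstripHashSpace (s : List Char) : List Char := s.dropWhile (fun c => c == '#' || c == ' ')

-- ===== PORT A =====
def extract_headings_and_body_prefix_markdown (md : String) (body_prefix_len : Int) : String × String :=
  let lines := (PySem.Str.split? md "\n").getD []
  let st := lines.foldl (fun (st : List String × List String × Int) line =>
    let s := PySem.Str.strip line
    if PySem.Str.startswith s "## " || PySem.Str.startswith s "### " then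
      let h := String.ofList (PySem.Chars.strip (pyLstripHashSpace s.toList))
      if h ≠ "" ∧ st.1.length < 60 then (st.1 ++ [h], st.2.1, st.2.2) else st
    else if s ≠ "" ∧ PySem.Str.startswith s "#" = false ∧ st.2.2 < body_prefix_len then
      (st.1, st.2.1 ++ [s], st.2.2 + (PySem.Str.len s + 1))
    else st) ([], [], 0)
  (PySem.Str.join " | " (PySem.List.slice st.1 none (some 60)),
   PySem.Str.slice (PySem.Str.join " " st.2.1) none (some body_prefix_len))

-- ===== PORT B =====
def extract_headings_and_body_prefix_markdown_alt (md : String) (body_prefix_len : Int) : String × String :=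
  let stripped := ((PySem.Str.split? md "\n").getD []).map PySem.Str.strip
  let heads := stripped.filterMap (fun s =>
    if PySem.Str.startswith s "## " || PySem.Str.startswith s "### " then
      let h := String.ofList (PySem.Chars.strip (pyLstripHashSpace s.toList))
      if h ≠ "" then some h else none
    else none)
  let headings := PySem.Str.join " | " (PySem.List.slice heads none (some 60))
  let kept := stripped.filter (fun s => s != "" && !PySem.Str.startswith s "#")
  let cums := List.scanl (fun acc s => acc + (PySem.Str.len s + 1)) 0 kept
  let taken := (kept.zip cums).takeWhile (fun p => p.2 < body_prefix_len)
  let body := PySem.Str.slice (PySem.Str.join " " (taken.map Prod.fst)) none (some body_prefix_len)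
  (headings, body)

-- ===== PRECONDITION & SPEC =====
def Spec_extract_headings_and_body_prefix_markdown (md : String) (body_prefix_len : Int) (out : String × String) : Prop := out = extract_headings_and_body_prefix_markdown_alt md body_prefix_len
instance (md : String) (body_prefix_len : Int) (out : String × String) : Decidable (Spec_extract_headings_and_body_prefix_markdown md body_prefix_len out) := by unfold Spec_extract_headings_and_body_prefix_markdown; infer_instance

-- ===== CLAIM (what is proved, stated in full; the proofs are below) =====
def Claim_equal_extract_headings_and_body_prefix_markdown : Prop := ∀ (md : String) (body_prefix_len : Int), Dom_extract_headings_and_body_prefix_markdown md body_prefix_len → Spec_extract_headings_and_body_prefix_markdown md body_prefix_len (extract_headings_and_body_prefix_markdown md body_prefix_len)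

-- ===== LEMMAS AND PROOFS =====

-- the branch on a stripped line, for headings only
def stepH (hs : List String) (s : String) : List String :=
  if PySem.Str.startswith s "## " || PySem.Str.startswith s "### " then
    if String.ofList (PySem.Chars.strip (pyLstripHashSpace s.toList)) ≠ "" ∧ hs.length < 60 then
      hs ++ [String.ofList (PySem.Chars.strip (pyLstripHashSpace s.toList))]
    else hs
  else hs

-- the branch on a stripped line, for the body accumulator
def stepB (L : Int) (st : List String × Int) (s : String) : List String × Int :=
  if PySem.Str.startswith s "## " || PySem.Str.startswith s "### " then st
  else if s ≠ "" ∧ PySem.Str.startswith s "#" = false ∧ st.2 < L then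
    (st.1 ++ [s], st.2 + (PySem.Str.len s + 1))
  else st

def hOf (s : String) : Option String :=
  if PySem.Str.startswith s "## " || PySem.Str.startswith s "### " then
    if String.ofList (PySem.Chars.strip (pyLstripHashSpace s.toList)) ≠ "" then
      some (String.ofList (PySem.Chars.strip (pyLstripHashSpace s.toList)))
    else none
  else none

def bodyGo (L : Int) : List String → Int → List String
  | [], _ => []
  | s :: r, t =>
    if t < L then s :: bodyGo L r (t + (PySem.Str.len s + 1)) else bodyGo L r t

lemma step_split (L : Int) (st : List String × List String × Int) (s : String) :
    (let h := String.ofList (PySem.Chars.strip (pyLstripHashSpace s.toList));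
     if PySem.Str.startswith s "## " || PySem.Str.startswith s "### " then
       if h ≠ "" ∧ st.1.length < 60 then (st.1 ++ [h], st.2.1, st.2.2) else st
     else if s ≠ "" ∧ PySem.Str.startswith s "#" = false ∧ st.2.2 < L then
       (st.1, st.2.1 ++ [s], st.2.2 + (PySem.Str.len s + 1))
     else st) = (stepH st.1 s, stepB L st.2 s) := by
  obtain ⟨hs, bs, t⟩ := st
  simp only [stepH, stepB]
  split_ifs <;> rfl

lemma foldl_split {α : Type} (f : List String → α → List String)
    (g : List String × Int → α → List String × Int) (ss : List α) (hs bs : List String) (t : Int) :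
    ss.foldl (fun st s => (f st.1 s, g st.2 s)) (hs, bs, t)
      = (ss.foldl f hs, ss.foldl g (bs, t)) := by
  induction ss generalizing hs bs t with
  | nil => rfl
  | cons s r ih => simpa using ih (f hs s) (g (bs, t) s).1 (g (bs, t) s).2

lemma foldl_stepH (ss : List String) (hs : List String) :
    ss.foldl stepH hs = hs ++ (ss.filterMap hOf).take (60 - hs.length) := by
  induction ss generalizing hs with
  | nil => simp
  | cons s r ih =>
    simp only [List.foldl_cons, List.filterMap_cons]
    by_cases hh : (PySem.Str.startswith s "## " || PySem.Str.startswith s "### ") = true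
    · by_cases hne : String.ofList (PySem.Chars.strip (pyLstripHashSpace s.toList)) ≠ ""
      · have hof : hOf s = some (String.ofList (PySem.Chars.strip (pyLstripHashSpace s.toList))) := by
          rw [hOf, if_pos hh, if_pos hne]
        by_cases hlt : hs.length < 60
        · have hstep : stepH hs s = hs ++ [String.ofList (PySem.Chars.strip (pyLstripHashSpace s.toList))] := by
            rw [stepH, if_pos hh, if_pos ⟨hne, hlt⟩]
          rw [hstep, hof, ih, List.append_assoc]
          congr 1
          rw [show (60 - (hs ++ [String.ofList (PySem.Chars.strip (pyLstripHashSpace s.toList))]).length) = 60 - (hs.length + 1) by simp,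
            show 60 - hs.length = (60 - (hs.length + 1)) + 1 from by omega, List.take_succ_cons]
          simp
        · have hstep : stepH hs s = hs := by
            rw [stepH, if_pos hh, if_neg (fun h => hlt h.2)]
          rw [hstep, hof, ih, show 60 - hs.length = 0 from by omega]
          simp
      · have hof : hOf s = none := by rw [hOf, if_pos hh, if_neg hne]
        have hstep : stepH hs s = hs := by
          rw [stepH, if_pos hh, if_neg (fun h => hne h.1)]
        rw [hstep, hof, ih]
    · have hof : hOf s = none := by rw [hOf, if_neg hh]
      have hstep : stepH hs s = hs := by rw [stepH, if_neg hh]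
      rw [hstep, hof, ih]

lemma head_not_body {s : String}
    (hh : (PySem.Str.startswith s "## " || PySem.Str.startswith s "### ") = true) :
    PySem.Str.startswith s "#" = true := by
  rw [PySem.Str.startswith_eq, PySem.Chars.startswith_iff]
  rcases Bool.or_eq_true_iff.mp hh with h | h <;>
    · rw [PySem.Str.startswith_eq, PySem.Chars.startswith_iff] at h
      exact List.IsPrefix.trans (by decide) h

lemma foldl_stepB (L : Int) (ss : List String) (bs : List String) (t : Int) :
    (ss.foldl (stepB L) (bs, t)).1
      = bs ++ bodyGo L (ss.filter (fun s => s != "" && !PySem.Str.startswith s "#")) t := by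
  induction ss generalizing bs t with
  | nil => simp [bodyGo]
  | cons s r ih =>
    simp only [List.foldl_cons, List.filter_cons]
    by_cases hh : (PySem.Str.startswith s "## " || PySem.Str.startswith s "### ") = true
    · have hb : (s != "" && !PySem.Str.startswith s "#") = false := by
        rw [head_not_body hh]; simp
      have hstep : stepB L (bs, t) s = (bs, t) := by rw [stepB, if_pos hh]
      rw [hstep, ih, hb]
      simp only [Bool.false_eq_true, if_false]
    · by_cases hp : (s != "" && !PySem.Str.startswith s "#") = true
      · obtain ⟨hp1', hp2'⟩ := Bool.and_eq_true_iff.mp hp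
        have hp1 : s ≠ "" := by simpa using hp1'
        have hp2 : PySem.Str.startswith s "#" = false := by simpa using hp2'
        rw [hp]
        by_cases hl : t < L
        · have hstep : stepB L (bs, t) s = (bs ++ [s], t + (PySem.Str.len s + 1)) := by
            rw [stepB, if_neg hh, if_pos ⟨hp1, hp2, hl⟩]
          rw [hstep, ih]
          simp only [if_true, bodyGo, if_pos hl, List.append_assoc, List.singleton_append]
        · have hstep : stepB L (bs, t) s = (bs, t) := by
            rw [stepB, if_neg hh, if_neg (fun h => hl h.2.2)]
          rw [hstep, ih]
          simp only [if_true, bodyGo, if_neg hl]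
      · have hp' : (s != "" && !PySem.Str.startswith s "#") = false := by
          simpa using hp
        have hstep : stepB L (bs, t) s = (bs, t) := by
          rw [stepB, if_neg hh, if_neg (fun h => hp (by rw [h.2.1]; simp [h.1]))]
        rw [hstep, ih, hp']
        simp only [Bool.false_eq_true, if_false]

lemma bodyGo_stop (L : Int) (ks : List String) (t : Int) (h : ¬ t < L) :
    bodyGo L ks t = [] := by
  induction ks generalizing t with
  | nil => rfl
  | cons s r ih => simp [bodyGo, h, ih t h]

lemma scanl_shift (r : List String) (a : Int) :
    List.scanl (fun acc s => acc + (PySem.Str.len s + 1)) a r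
      = (List.scanl (fun acc s => acc + (PySem.Str.len s + 1)) 0 r).map (a + ·) := by
  induction r generalizing a with
  | nil => simp
  | cons s r ih =>
    simp only [List.scanl_cons, List.map_cons, add_zero]
    congr 1
    rw [ih (a + (PySem.Str.len s + 1)), ih (0 + (PySem.Str.len s + 1)), List.map_map]
    congr 1
    funext x
    simp
    ring

lemma bodyGo_takeWhile (L : Int) (ks : List String) (t : Int) :
    bodyGo L ks t
      = ((ks.zip (List.scanl (fun acc s => acc + (PySem.Str.len s + 1)) 0 ks)).takeWhile
          (fun p => decide (p.2 < L - t))).map Prod.fst := by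
  induction ks generalizing t with
  | nil => simp [bodyGo]
  | cons s r ih =>
    simp only [List.scanl_cons, List.zip_cons_cons, List.takeWhile_cons]
    by_cases hl : t < L
    · have hc : decide ((0 : Int) < L - t) = true := by simp; omega
      rw [hc]
      simp only [bodyGo, if_pos hl]
      congr 1
      rw [ih (t + (PySem.Str.len s + 1))]
      rw [scanl_shift r (0 + (PySem.Str.len s + 1)), List.zip_map_right, List.takeWhile_map,
        List.map_map]
      have hpred : ((fun p : String × Int => decide (p.2 < L - t)) ∘ Prod.map id (fun x => 0 + (PySem.Str.len s + 1) + x))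
          = fun p : String × Int => decide (p.2 < L - (t + (PySem.Str.len s + 1))) := by
        funext p
        simp only [Function.comp, Prod.map]
        exact decide_eq_decide.mpr (by omega)
      rw [hpred]
      congr 1
    · have hc : decide ((0 : Int) < L - t) = false := by simp; omega
      rw [hc]
      simp only [bodyGo, if_neg hl]
      exact bodyGo_stop L r t hl

-- ===== VERDICT (by name: the statement is the Claim_ definition above) =====
set_option maxHeartbeats 1000000 in
theorem extract_headings_and_body_prefix_markdown_spec : Claim_equal_extract_headings_and_body_prefix_markdown := by
  intro md L _
  unfold Spec_extract_headings_and_body_prefix_markdown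
  unfold extract_headings_and_body_prefix_markdown extract_headings_and_body_prefix_markdown_alt
  simp only
  set lines := (PySem.Str.split? md "\n").getD [] with hlines
  have hstep : (fun (st : List String × List String × Int) (line : String) =>
      let s := PySem.Str.strip line
      if PySem.Str.startswith s "## " || PySem.Str.startswith s "### " then
        let h := String.ofList (PySem.Chars.strip (pyLstripHashSpace s.toList))
        if h ≠ "" ∧ st.1.length < 60 then (st.1 ++ [h], st.2.1, st.2.2) else st
      else if s ≠ "" ∧ PySem.Str.startswith s "#" = false ∧ st.2.2 < L then
        (st.1, st.2.1 ++ [s], st.2.2 + (PySem.Str.len s + 1))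
      else st)
      = fun st line => (stepH st.1 (PySem.Str.strip line), stepB L st.2 (PySem.Str.strip line)) := by
    funext st line
    exact step_split L st (PySem.Str.strip line)
  have hfold : lines.foldl (fun (st : List String × List String × Int) line =>
      let s := PySem.Str.strip line
      if PySem.Str.startswith s "## " || PySem.Str.startswith s "### " then
        let h := String.ofList (PySem.Chars.strip (pyLstripHashSpace s.toList))
        if h ≠ "" ∧ st.1.length < 60 then (st.1 ++ [h], st.2.1, st.2.2) else st
      else if s ≠ "" ∧ PySem.Str.startswith s "#" = false ∧ st.2.2 < L then
        (st.1, st.2.1 ++ [s], st.2.2 + (PySem.Str.len s + 1))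
      else st) ([], [], 0)
      = ((lines.map PySem.Str.strip).foldl stepH [],
         (lines.map PySem.Str.strip).foldl (stepB L) ([], 0)) := by
    rw [hstep, List.foldl_map, List.foldl_map]
    exact foldl_split (fun x y => stepH x (PySem.Str.strip y))
      (fun x y => stepB L x (PySem.Str.strip y)) lines [] [] 0
  rw [hfold]
  refine Prod.ext ?_ ?_ <;> simp only
  · -- headings
    rw [foldl_stepH]
    simp only [List.nil_append, List.length_nil, Nat.sub_zero]
    simp [PySem.List.slice_to, hOf, List.take_take]
  · -- body
    rw [foldl_stepB]
    simp only [List.nil_append]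
    rw [bodyGo_takeWhile]
    rw [show (fun p : String × Int => decide (p.2 < L - 0)) = fun p : String × Int => decide (p.2 < L)
      from funext fun p => decide_eq_decide.mpr (by omega)]
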